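-- pv_equiv track=rewrite | github.com/ocirne/adventofcode | python/src/aoc/year2021/day19.py | rotate_base_cubes
-- ===== SOURCE A (Python) =====
-- def roll(v):
--     return v[0], v[2], -v[1]
--
-- def turn(v):
--     return -v[1], v[0], v[2]
--
-- def rotations(v):
--     for _ in range(2):
--         for _ in range(3):
--             v = roll(v)
--             yield v
--             for _ in range(3):
--                 v = turn(v)
--                 yield v
--         v = roll(turn(roll(v)))
--
-- def rotate_base_cubes(base_cubes):
--     rotated_cubes = []
--     for base_cube in base_cubes[1:]:
--         rotated_cube = [[] for _ in range(24)]
--         for xyz in base_cube: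
--             for j, r in enumerate(rotations(xyz)):
--                 rotated_cube[j].append(r)
--         rotated_cubes.append(rotated_cube)
--     # first cube is not rotated
--     return base_cubes[0], rotated_cubes
-- ===== SOURCE B (Python) =====
-- # Table-driven: the 24 orientation matrices are fixed, so apply them directly
-- # instead of stepping a roll/turn generator per point.
-- ROTS = [
--     ((1, 0, 0), (0, 0, 1), (0, -1, 0)),
--     ((0, 0, -1), (1, 0, 0), (0, -1, 0)),
--     ((-1, 0, 0), (0, 0, -1), (0, -1, 0)),
--     ((0, 0, 1), (-1, 0, 0), (0, -1, 0)),
--     ((0, 0, 1), (0, -1, 0), (1, 0, 0)),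
--     ((0, 1, 0), (0, 0, 1), (1, 0, 0)),
--     ((0, 0, -1), (0, 1, 0), (1, 0, 0)),
--     ((0, -1, 0), (0, 0, -1), (1, 0, 0)),
--     ((0, -1, 0), (1, 0, 0), (0, 0, 1)),
--     ((-1, 0, 0), (0, -1, 0), (0, 0, 1)),
--     ((0, 1, 0), (-1, 0, 0), (0, 0, 1)),
--     ((1, 0, 0), (0, 1, 0), (0, 0, 1)),
--     ((0, 0, -1), (-1, 0, 0), (0, 1, 0)),
--     ((1, 0, 0), (0, 0, -1), (0, 1, 0)),
--     ((0, 0, 1), (1, 0, 0), (0, 1, 0)),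
--     ((-1, 0, 0), (0, 0, 1), (0, 1, 0)),
--     ((-1, 0, 0), (0, 1, 0), (0, 0, -1)),
--     ((0, -1, 0), (-1, 0, 0), (0, 0, -1)),
--     ((1, 0, 0), (0, -1, 0), (0, 0, -1)),
--     ((0, 1, 0), (1, 0, 0), (0, 0, -1)),
--     ((0, 1, 0), (0, 0, -1), (-1, 0, 0)),
--     ((0, 0, 1), (0, 1, 0), (-1, 0, 0)),
--     ((0, -1, 0), (0, 0, 1), (-1, 0, 0)),
--     ((0, 0, -1), (0, -1, 0), (-1, 0, 0)),
-- ]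
--
--
-- def rotate_base_cubes(base_cubes):
--     rotated_cubes = [
--         [
--             [
--                 (a * x + b * y + c * z, d * x + e * y + f * z, g * x + h * y + i * z)
--                 for (x, y, z) in cube
--             ]
--             for ((a, b, c), (d, e, f), (g, h, i)) in ROTS
--         ]
--         for cube in base_cubes[1:]
--     ]
--     return base_cubes[0], rotated_cubes
-- ===== Notes on version B (the rewrite author's own statement) =====
-- stated objective: simpler
-- what changed: Replaces the per-point roll/turn generator stepping with a fixed table of the 24 rotation matrices applied directly in one comprehension, dropping the enumerate-into-preallocated-buckets loop.
import Mathlib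
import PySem

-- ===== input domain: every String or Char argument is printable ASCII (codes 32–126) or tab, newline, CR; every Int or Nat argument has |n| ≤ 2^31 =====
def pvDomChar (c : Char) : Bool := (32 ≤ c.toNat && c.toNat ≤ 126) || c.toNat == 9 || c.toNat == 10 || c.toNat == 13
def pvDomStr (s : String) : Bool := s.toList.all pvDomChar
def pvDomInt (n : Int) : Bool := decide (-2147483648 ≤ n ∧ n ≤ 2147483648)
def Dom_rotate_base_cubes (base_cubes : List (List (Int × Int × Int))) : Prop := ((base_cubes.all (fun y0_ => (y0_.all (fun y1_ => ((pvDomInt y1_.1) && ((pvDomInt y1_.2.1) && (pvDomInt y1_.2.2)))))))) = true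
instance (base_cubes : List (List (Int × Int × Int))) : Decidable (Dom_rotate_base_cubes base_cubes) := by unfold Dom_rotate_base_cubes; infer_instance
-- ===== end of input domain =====

-- B replaces the per-point roll/turn generator by a fixed table of the 24 rotation
-- matrices applied directly (objective: simpler, table-driven decomposition).

-- ===== PORT A =====
def roll (v : Int × Int × Int) : Int × Int × Int := (v.1, v.2.2, -v.2.1)

def turn (v : Int × Int × Int) : Int × Int × Int := (-v.2.1, v.1, v.2.2)

-- rotations(v): the generator, materialised as the list of its 24 yields
def rotations (v0 : Int × Int × Int) : List (Int × Int × Int) :=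
  ((List.range 2).foldl (fun st _ =>
      let st := (List.range 3).foldl (fun st _ =>
          let v := roll st.1
          let st := (v, st.2 ++ [v])
          (List.range 3).foldl (fun st _ =>
              let v := turn st.1
              (v, st.2 ++ [v])) st) st
      (roll (turn (roll st.1)), st.2)) (v0, ([] : List (Int × Int × Int)))).2

-- `base_cubes[0]` ported as headD: exact on Pre_ (nonempty); Python raises IndexError on []
def rotate_base_cubes (base_cubes : List (List (Int × Int × Int))) :
    (List (Int × Int × Int)) × (List (List (List (Int × Int × Int)))) :=
  let rotated_cubes := (base_cubes.drop 1).foldl (fun rcs base_cube =>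
    let rotated_cube := base_cube.foldl (fun rc xyz =>
      -- for j, r in enumerate(rotations(xyz)): rotated_cube[j].append(r)
      ((rotations xyz).foldl
          (fun (st : Nat × List (List (Int × Int × Int))) r =>
            (st.1 + 1, st.2.set st.1 ((st.2.getD st.1 []) ++ [r])))
          (0, rc)).2)
      (List.replicate 24 ([] : List (Int × Int × Int)))
    rcs ++ [rotated_cube]) []
  (base_cubes.headD [], rotated_cubes)

-- ===== PORT B =====
def ROTS : List ((Int × Int × Int) × (Int × Int × Int) × (Int × Int × Int)) :=
  [ ((1, 0, 0), (0, 0, 1), (0, -1, 0)),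
    ((0, 0, -1), (1, 0, 0), (0, -1, 0)),
    ((-1, 0, 0), (0, 0, -1), (0, -1, 0)),
    ((0, 0, 1), (-1, 0, 0), (0, -1, 0)),
    ((0, 0, 1), (0, -1, 0), (1, 0, 0)),
    ((0, 1, 0), (0, 0, 1), (1, 0, 0)),
    ((0, 0, -1), (0, 1, 0), (1, 0, 0)),
    ((0, -1, 0), (0, 0, -1), (1, 0, 0)),
    ((0, -1, 0), (1, 0, 0), (0, 0, 1)),
    ((-1, 0, 0), (0, -1, 0), (0, 0, 1)),
    ((0, 1, 0), (-1, 0, 0), (0, 0, 1)),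
    ((1, 0, 0), (0, 1, 0), (0, 0, 1)),
    ((0, 0, -1), (-1, 0, 0), (0, 1, 0)),
    ((1, 0, 0), (0, 0, -1), (0, 1, 0)),
    ((0, 0, 1), (1, 0, 0), (0, 1, 0)),
    ((-1, 0, 0), (0, 0, 1), (0, 1, 0)),
    ((-1, 0, 0), (0, 1, 0), (0, 0, -1)),
    ((0, -1, 0), (-1, 0, 0), (0, 0, -1)),
    ((1, 0, 0), (0, -1, 0), (0, 0, -1)),
    ((0, 1, 0), (1, 0, 0), (0, 0, -1)),
    ((0, 1, 0), (0, 0, -1), (-1, 0, 0)),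
    ((0, 0, 1), (0, 1, 0), (-1, 0, 0)),
    ((0, -1, 0), (0, 0, 1), (-1, 0, 0)),
    ((0, 0, -1), (0, -1, 0), (-1, 0, 0)) ]

def applyRot (m : (Int × Int × Int) × (Int × Int × Int) × (Int × Int × Int))
    (p : Int × Int × Int) : Int × Int × Int :=
  (m.1.1 * p.1 + m.1.2.1 * p.2.1 + m.1.2.2 * p.2.2,
   m.2.1.1 * p.1 + m.2.1.2.1 * p.2.1 + m.2.1.2.2 * p.2.2,
   m.2.2.1 * p.1 + m.2.2.2.1 * p.2.1 + m.2.2.2.2 * p.2.2)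

def rotate_base_cubes_alt (base_cubes : List (List (Int × Int × Int))) :
    (List (Int × Int × Int)) × (List (List (List (Int × Int × Int)))) :=
  (base_cubes.headD [],
   (base_cubes.drop 1).map (fun cube =>
      ROTS.map (fun m => cube.map (fun p => applyRot m p))))

-- ===== PRECONDITION & SPEC =====
-- Pre_ excludes only the empty list, on which Python A raises IndexError at base_cubes[0]
def Pre_rotate_base_cubes (base_cubes : List (List (Int × Int × Int))) : Prop :=
  base_cubes ≠ []
instance (base_cubes : List (List (Int × Int × Int))) : Decidable (Pre_rotate_base_cubes base_cubes) := by unfold Pre_rotate_base_cubes; infer_instance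

def pvWitness_rotate_base_cubes : (List (List (Int × Int × Int))) := [[(1, 2, 3)], [(4, -5, 6)]]

def Spec_rotate_base_cubes (base_cubes : List (List (Int × Int × Int))) (out : (List (Int × Int × Int)) × (List (List (List (Int × Int × Int))))) : Prop := out = rotate_base_cubes_alt base_cubes
instance (base_cubes : List (List (Int × Int × Int))) (out : (List (Int × Int × Int)) × (List (List (List (Int × Int × Int))))) : Decidable (Spec_rotate_base_cubes base_cubes out) := by unfold Spec_rotate_base_cubes; infer_instance

-- ===== CLAIM (what is proved, stated in full; the proofs are below) =====
def Claim_equal_rotate_base_cubes : Prop := ∀ (base_cubes : List (List (Int × Int × Int))), Dom_rotate_base_cubes base_cubes → Pre_rotate_base_cubes base_cubes → Spec_rotate_base_cubes base_cubes (rotate_base_cubes base_cubes)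

-- ===== LEMMAS AND PROOFS =====

-- The generator's 24 yields are exactly the 24 table matrices applied to the point.
theorem rotations_eq_table (v : Int × Int × Int) :
    rotations v = ROTS.map (fun m => applyRot m v) := by
  obtain ⟨x, y, z⟩ := v
  simp [rotations, roll, turn, ROTS, applyRot, List.range_succ]

-- the inner enumerate loop of A, as a standalone step function
def stepA (rc : List (List (Int × Int × Int))) (xyz : Int × Int × Int) :
    List (List (Int × Int × Int)) :=
  ((rotations xyz).foldl
      (fun (st : Nat × List (List (Int × Int × Int))) r =>
        (st.1 + 1, st.2.set st.1 ((st.2.getD st.1 []) ++ [r])))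
      (0, rc)).2

theorem fold_set_zip (ys : List (Int × Int × Int))
    (pre post : List (List (Int × Int × Int))) (h : post.length = ys.length) :
    (ys.foldl
      (fun (st : Nat × List (List (Int × Int × Int))) r =>
        (st.1 + 1, st.2.set st.1 ((st.2.getD st.1 []) ++ [r])))
      (pre.length, pre ++ post)).2
    = pre ++ List.zipWith (fun l r => l ++ [r]) post ys := by
  induction ys generalizing pre post with
  | nil =>
    have : post = [] := List.eq_nil_of_length_eq_zero h
    simp [this]
  | cons r ys ih =>
    cases post with
    | nil => simp at h
    | cons q post =>
      simp only [List.foldl_cons, List.zipWith_cons_cons]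
      have hget : (pre ++ q :: post).getD pre.length [] = q := by
        simp [List.getD]
      have hset : (pre ++ q :: post).set pre.length (q ++ [r])
          = (pre ++ [q ++ [r]]) ++ post := by
        rw [List.set_append_right _ _ (Nat.le_refl pre.length)]
        simp
      have hlen : pre.length + 1 = (pre ++ [q ++ [r]]).length := by simp
      rw [hget, hset, hlen, ih (pre ++ [q ++ [r]]) post (by simpa using h)]
      simp

theorem stepA_zip (rc : List (List (Int × Int × Int))) (xyz : Int × Int × Int)
    (h : rc.length = 24) :
    stepA rc xyz = List.zipWith (fun l r => l ++ [r]) rc (rotations xyz) := by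
  have hlen : (rotations xyz).length = 24 := by
    rw [rotations_eq_table]; simp [ROTS]
  have := fold_set_zip (rotations xyz) [] rc (by omega)
  simpa [stepA] using this

theorem zipWith_self {α β : Type} (f : α → α → β) (l : List α) :
    List.zipWith f l l = l.map (fun a => f a a) := by
  induction l with
  | nil => rfl
  | cons a l _ => simp

theorem build_cube (cube : List (Int × Int × Int)) :
    cube.foldl stepA (List.replicate 24 ([] : List (Int × Int × Int)))
    = ROTS.map (fun m => cube.map (fun p => applyRot m p)) := by
  induction cube using List.reverseRecOn with
  | nil => rfl
  | append_singleton cube p ih =>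
    rw [List.foldl_append, List.foldl_cons, List.foldl_nil, ih,
      stepA_zip _ _ (by simp [ROTS]), rotations_eq_table]
    rw [List.zipWith_map (f := fun l r => l ++ [r])
      (g := fun m => cube.map (fun p => applyRot m p))
      (h := fun m => applyRot m p) (l₁ := ROTS) (l₂ := ROTS)]
    rw [zipWith_self]
    simp

theorem foldl_append_singleton (l : List (List (Int × Int × Int)))
    (f : List (Int × Int × Int) → List (List (Int × Int × Int)))
    (acc : List (List (List (Int × Int × Int)))) :
    l.foldl (fun rcs c => rcs ++ [f c]) acc = acc ++ l.map f := by
  induction l generalizing acc with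
  | nil => simp
  | cons c l ih => simp [ih]

-- ===== VERDICT (by name: the statement is the Claim_ definition above) =====
theorem rotate_base_cubes_spec : Claim_equal_rotate_base_cubes := by
  intro base_cubes _ _
  unfold Spec_rotate_base_cubes rotate_base_cubes rotate_base_cubes_alt
  have hinner : ∀ base_cube : List (Int × Int × Int),
      base_cube.foldl (fun rc xyz =>
        ((rotations xyz).foldl
          (fun (st : Nat × List (List (Int × Int × Int))) r =>
            (st.1 + 1, st.2.set st.1 ((st.2.getD st.1 []) ++ [r])))
          (0, rc)).2)
        (List.replicate 24 ([] : List (Int × Int × Int)))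
      = ROTS.map (fun m => base_cube.map (fun p => applyRot m p)) := by
    intro base_cube
    have := build_cube base_cube
    simpa [stepA] using this
  rw [foldl_append_singleton (base_cubes.drop 1)
      (fun base_cube => base_cube.foldl (fun rc xyz =>
        ((rotations xyz).foldl
          (fun (st : Nat × List (List (Int × Int × Int))) r =>
            (st.1 + 1, st.2.set st.1 ((st.2.getD st.1 []) ++ [r])))
          (0, rc)).2)
        (List.replicate 24 ([] : List (Int × Int × Int)))) []]
  simp only [List.nil_append]
  exact congrArg _ (List.map_congr_left (fun bc _ => hinner bc))
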